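-- pv_equiv track=rewrite | github.com/JacobLMiller/jacob-advent-code-solutions | 2017/9/code.py | remove_substring
-- ===== SOURCE A (Python) =====
-- def remove_substring(s):
--     ns = ""
--     i = 0
--     while i < len(s):
--         if s[i] == "!" and i < len(s)-1:
--             i += 2
--         else:
--             ns += s[i]
--             i += 1
--     return ns
-- ===== SOURCE B (Python) =====
-- import re
--
-- def remove_substring(s):
--     return re.sub(r'!.', '', s, flags=re.DOTALL)
-- ===== Notes on version B (the rewrite author's own statement) =====
-- stated objective: idiomatic
-- what changed: Replaced the index-driven while loop with repeated string concatenation by a single regex substitution (pattern bang-dot with DOTALL, replaced by the empty string), which deletes each exclamation mark together with the character after it in one non-overlapping left-to-right pass.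
import Mathlib
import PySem

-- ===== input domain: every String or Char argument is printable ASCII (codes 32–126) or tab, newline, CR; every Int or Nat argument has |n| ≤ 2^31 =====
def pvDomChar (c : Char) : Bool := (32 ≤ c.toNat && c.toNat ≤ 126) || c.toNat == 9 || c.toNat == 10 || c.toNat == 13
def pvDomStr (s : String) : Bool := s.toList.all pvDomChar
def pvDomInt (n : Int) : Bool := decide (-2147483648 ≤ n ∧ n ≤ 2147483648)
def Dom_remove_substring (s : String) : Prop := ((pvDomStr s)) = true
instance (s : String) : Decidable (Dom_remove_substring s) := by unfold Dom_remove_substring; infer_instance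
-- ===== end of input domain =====

-- B replaces A's index-driven while loop (quadratic string concatenation) by a single
-- regex substitution re.sub(r'!.', '', s, re.DOTALL); same return value, idiomatic.


-- ===== PORT A =====
-- literal transliteration of A's while loop: index i, accumulator ns, appending s[i]
def removeLoopA (cs : List Char) (i : Nat) (ns : List Char) : List Char :=
  if h : i < cs.length then
    if cs[i] = '!' ∧ i < cs.length - 1 then
      removeLoopA cs (i + 2) ns
    else
      removeLoopA cs (i + 1) (ns ++ [cs[i]])
  else ns
termination_by cs.length - i

def remove_substring (s : String) : String :=
  String.ofList (removeLoopA s.toList 0 [])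

-- ===== PORT B =====
-- exact model of re.sub(r'!.', '', s, flags=re.DOTALL): non-overlapping leftmost matches
-- of '!' followed by any character are deleted.
def subBangDot : List Char → List Char
  | [] => []
  | '!' :: _ :: rest => subBangDot rest
  | c :: rest => c :: subBangDot rest

def remove_substring_alt (s : String) : String :=
  String.ofList (subBangDot s.toList)

-- ===== PRECONDITION & SPEC =====
def Spec_remove_substring (s : String) (out : String) : Prop := out = remove_substring_alt s
instance (s : String) (out : String) : Decidable (Spec_remove_substring s out) := by unfold Spec_remove_substring; infer_instance

-- ===== CLAIM (what is proved, stated in full; the proofs are below) =====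
def Claim_equal_remove_substring : Prop := ∀ (s : String), Dom_remove_substring s → Spec_remove_substring s (remove_substring s)

-- ===== LEMMAS AND PROOFS =====

theorem subBang_cons_ne (c : Char) (rest : List Char) (hc : c ≠ '!') :
    subBangDot (c :: rest) = c :: subBangDot rest := by
  cases rest with
  | nil =>
    rw [subBangDot.eq_def]
    split <;> simp_all [subBangDot]
  | cons c2 r =>
    rw [subBangDot.eq_def]
    split <;> simp_all

theorem removeLoopA_eq_subBangDot (cs : List Char) (i : Nat) (ns : List Char) :
    removeLoopA cs i ns = ns ++ subBangDot (cs.drop i) := by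
  by_cases h : i < cs.length
  · rw [removeLoopA]
    have hdrop : cs.drop i = cs[i] :: cs.drop (i + 1) := (List.getElem_cons_drop h).symm
    by_cases hb : cs[i] = '!' ∧ i < cs.length - 1
    · have h1 : i + 1 < cs.length := by omega
      have hdrop1 : cs.drop (i + 1) = cs[i + 1] :: cs.drop (i + 2) :=
        (List.getElem_cons_drop h1).symm
      rw [dif_pos h, if_pos hb, removeLoopA_eq_subBangDot cs (i + 2) ns,
        hdrop, hdrop1, hb.1, subBangDot]
    · rw [dif_pos h, if_neg hb, removeLoopA_eq_subBangDot cs (i + 1) (ns ++ [cs[i]]), hdrop]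
      by_cases hc : cs[i] = '!'
      · -- then i = cs.length - 1, so drop (i+1) = []
        have : ¬ i < cs.length - 1 := fun hlt => hb ⟨hc, hlt⟩
        have hnil : cs.drop (i + 1) = [] := List.drop_eq_nil_of_le (by omega)
        rw [hnil, hc]
        have hred : subBangDot ['!'] = ['!'] := rfl
        rw [hred]
        simp [subBangDot]
      · rw [subBang_cons_ne _ _ hc]
        simp
  · rw [removeLoopA, dif_neg h, List.drop_eq_nil_of_le (by omega), subBangDot]
    simp
termination_by cs.length - i

-- ===== VERDICT (by name: the statement is the Claim_ definition above) =====
theorem remove_substring_spec : Claim_equal_remove_substring := by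
  intro s _
  unfold Spec_remove_substring remove_substring remove_substring_alt
  rw [removeLoopA_eq_subBangDot]
  simp
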